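-- pv_equiv track=rewrite | github.com/327000/Algorithm_JS | Level1/p5.py | solution
-- ===== SOURCE A (Python) =====
-- def solution(sizes):
--     answer = 0
--     max_w = sizes[0][0]
--     max_h = sizes[0][1]
--
--     for i in range(1, len(sizes)):
--         if sizes[i][0] < sizes[i][1]:
--             a = sizes[i][0]
--             sizes[i][0] = sizes[i][1]
--             sizes[i][1] = a
--
--         if max_w >= max_h:
--             if max_w < sizes[i][0]:
--                 max_w = sizes[i][0]
--             if max_h < sizes[i][1]:
--                 max_h = sizes[i][1]
--
--         else:
--             if max_h < sizes[i][0]: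
--                 max_h = sizes[i][0]
--             if max_w < sizes[i][1]:
--                 max_w = sizes[i][1]
--     answer = max_w * max_h
--     return answer
-- ===== SOURCE B (Python) =====
-- def solution(sizes):
--     # Divide and conquer: recursively merge (max larger side, max smaller side)
--     # of the two halves; return-value equivalent to A (A also swaps sizes[i]
--     # in place for i >= 1, B does not mutate its argument).
--     def rec(lst):
--         if len(lst) <= 1:
--             s = lst[0]
--             return (max(s[0], s[1]), min(s[0], s[1]))
--         mid = len(lst) // 2
--         w1, h1 = rec(lst[:mid])
--         w2, h2 = rec(lst[mid:])
--         return (max(w1, w2), max(h1, h2))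
--     w, h = rec(sizes)
--     return w * h
-- ===== Notes on version B (the rewrite author's own statement) =====
-- stated objective: alternative
-- what changed: A does one forward pass threading a stateful pair (max_w,max_h) whose roles swap depending on which is currently larger (and swaps each row in place); B is a divide-and-conquer recursion that splits the list in half, returns (max larger side, max smaller side) of each half and merges them componentwise, without mutating the argument.
import Mathlib
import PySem

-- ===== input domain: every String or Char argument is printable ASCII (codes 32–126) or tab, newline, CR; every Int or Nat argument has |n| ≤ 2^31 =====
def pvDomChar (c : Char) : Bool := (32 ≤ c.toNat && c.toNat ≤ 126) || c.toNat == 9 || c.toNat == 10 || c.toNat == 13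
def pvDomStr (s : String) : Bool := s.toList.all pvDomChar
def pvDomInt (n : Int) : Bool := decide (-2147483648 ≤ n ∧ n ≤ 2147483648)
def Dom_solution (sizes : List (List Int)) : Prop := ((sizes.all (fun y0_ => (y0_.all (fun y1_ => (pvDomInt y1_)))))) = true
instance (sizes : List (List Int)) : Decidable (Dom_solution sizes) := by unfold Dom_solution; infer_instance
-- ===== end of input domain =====

-- B replaces A's single forward pass (a stateful pair whose roles swap) by a
-- divide-and-conquer recursion merging (max larger side, max smaller side) of the halves;
-- equivalence is about the RETURN value only — A swaps sizes[i] in place for i ≥ 1, B does not mutate.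

-- ===== PORT A =====
-- one body of A's for-loop; A's in-place swap of sizes[i] only affects the two reads of
-- sizes[i][0]/sizes[i][1] in the same iteration, represented here by the locals a0/a1
def stepA (acc : Int × Int) (s : List Int) : Int × Int :=
  let s0 := PySem.List.pyGetD s 0 0
  let s1 := PySem.List.pyGetD s 1 0
  let a0 := if s0 < s1 then s1 else s0
  let a1 := if s0 < s1 then s0 else s1
  if acc.1 ≥ acc.2 then
    (if acc.1 < a0 then a0 else acc.1, if acc.2 < a1 then a1 else acc.2)
  else
    (if acc.1 < a1 then a1 else acc.1, if acc.2 < a0 then a0 else acc.2)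

def solution (sizes : List (List Int)) : Int :=
  let max_w := PySem.List.pyGetD (PySem.List.pyGetD sizes 0 []) 0 0
  let max_h := PySem.List.pyGetD (PySem.List.pyGetD sizes 0 []) 1 0
  let p := (PySem.List.pyRange 1 (PySem.List.len sizes) 1).foldl
    (fun acc i => stepA acc (PySem.List.pyGetD sizes i [])) (max_w, max_h)
  p.1 * p.2

-- ===== PORT B =====
-- rec(lst) of Source B: split in half, merge (max larger side, max smaller side)
theorem floordiv_len_two (lst : List (List Int)) :
    PySem.Int.floordiv (PySem.List.len lst) 2 = ((lst.length / 2 : Nat) : Int) := by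
  simp only [PySem.List.len_eq]
  exact_mod_cast PySem.Int.floordiv_natCast lst.length 2

def recB (lst : List (List Int)) : Int × Int :=
  if _h : lst.length ≤ 1 then
    let s := PySem.List.pyGetD lst 0 []
    (max (PySem.List.pyGetD s 0 0) (PySem.List.pyGetD s 1 0),
     min (PySem.List.pyGetD s 0 0) (PySem.List.pyGetD s 1 0))
  else
    let mid := PySem.Int.floordiv (PySem.List.len lst) 2
    let p := recB (PySem.List.slice lst none (some mid))
    let q := recB (PySem.List.slice lst (some mid) none)
    (max p.1 q.1, max p.2 q.2)
termination_by lst.length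
decreasing_by
  · rw [floordiv_len_two, PySem.List.slice_to_natCast]
    simp only [List.length_take]
    omega
  · rw [floordiv_len_two, PySem.List.slice_from_natCast]
    simp only [List.length_drop]
    omega

def solution_alt (sizes : List (List Int)) : Int :=
  let p := recB sizes
  p.1 * p.2

-- ===== PRECONDITION & SPEC =====
-- Pre_ excludes exactly the inputs on which A raises IndexError: the empty list and
-- lists containing a row of fewer than two entries.
def Pre_solution (sizes : List (List Int)) : Prop :=
  sizes ≠ [] ∧ ∀ s ∈ sizes, 2 ≤ s.length
instance (sizes : List (List Int)) : Decidable (Pre_solution sizes) := by unfold Pre_solution; infer_instance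

def pvWitness_solution : List (List Int) := [[1, 2], [3, 4]]

def Spec_solution (sizes : List (List Int)) (out : Int) : Prop := out = solution_alt sizes
instance (sizes : List (List Int)) (out : Int) : Decidable (Spec_solution sizes out) := by unfold Spec_solution; infer_instance

-- ===== CLAIM (what is proved, stated in full; the proofs are below) =====
def Claim_equal_solution : Prop := ∀ (sizes : List (List Int)), Dom_solution sizes → Pre_solution sizes → Spec_solution sizes (solution sizes)

-- ===== LEMMAS AND PROOFS =====

def bigOf (s : List Int) : Int := max (PySem.List.pyGetD s 0 0) (PySem.List.pyGetD s 1 0)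
def smallOf (s : List Int) : Int := min (PySem.List.pyGetD s 0 0) (PySem.List.pyGetD s 1 0)

-- max of a nonempty list (0 on [])
def listMax : List Int → Int
  | [] => 0
  | x :: xs => xs.foldl max x

theorem foldl_max_max (l : List Int) (a b : Int) :
    l.foldl max (max a b) = max a (l.foldl max b) := by
  induction l generalizing b with
  | nil => rfl
  | cons y t ih => simp only [List.foldl_cons, max_assoc, ih]

theorem listMax_append (l1 l2 : List Int) (h1 : l1 ≠ []) (h2 : l2 ≠ []) :
    listMax (l1 ++ l2) = max (listMax l1) (listMax l2) := by
  obtain ⟨x, xs, rfl⟩ := List.exists_cons_of_ne_nil h1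
  obtain ⟨y, ys, rfl⟩ := List.exists_cons_of_ne_nil h2
  simp only [listMax, List.cons_append, List.foldl_append, List.foldl_cons]
  exact foldl_max_max ys _ y

-- the recursion computes the two max-reductions over its slice
theorem recB_char (l : List (List Int)) (hne : l ≠ []) :
    recB l = (listMax (l.map bigOf), listMax (l.map smallOf)) := by
  induction hn : l.length using Nat.strong_induction_on generalizing l with
  | _ n ih =>
    rw [recB]
    split_ifs with hle
    · obtain ⟨x, t, rfl⟩ := List.exists_cons_of_ne_nil hne
      have ht : t = [] := by
        cases t with
        | nil => rfl
        | cons a b => simp at hle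
      subst ht
      simp [listMax, bigOf, smallOf, PySem.List.pyGetD, PySem.List.pyGet?, PySem.List.pyIdx?]
    · dsimp only
      rw [floordiv_len_two, PySem.List.slice_to_natCast, PySem.List.slice_from_natCast]
      have hlen : 2 ≤ l.length := by omega
      have hmid : 1 ≤ l.length / 2 ∧ l.length / 2 < l.length := by omega
      have htk : (l.take (l.length / 2)) ≠ [] := by
        apply List.ne_nil_of_length_pos
        simp only [List.length_take]; omega
      have hdr : (l.drop (l.length / 2)) ≠ [] := by
        apply List.ne_nil_of_length_pos
        simp only [List.length_drop]; omega
      rw [ih (l.take (l.length / 2)).length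
            (by rw [← hn]; simp only [List.length_take]; omega) _ htk rfl,
          ih (l.drop (l.length / 2)).length
            (by rw [← hn]; simp only [List.length_drop]; omega) _ hdr rfl]
      have hsplit : l = l.take (l.length / 2) ++ l.drop (l.length / 2) := (List.take_append_drop _ _).symm
      conv_rhs => rw [hsplit]
      rw [List.map_append, List.map_append,
        listMax_append _ _ (by simpa using htk) (by simpa using hdr),
        listMax_append _ _ (by simpa using htk) (by simpa using hdr)]

-- one loop step of A keeps the invariant: the larger component of the pair is the running
-- max of the rows' larger sides, the smaller component the running max of the smaller sides
theorem stepA_max_min (w h : Int) (s : List Int) :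
    max (stepA (w, h) s).1 (stepA (w, h) s).2 = max (max w h) (bigOf s) ∧
    min (stepA (w, h) s).1 (stepA (w, h) s).2 = max (min w h) (smallOf s) := by
  unfold stepA bigOf smallOf
  dsimp only
  split_ifs <;> constructor <;> omega

theorem foldA_char (l : List (List Int)) (w h : Int) :
    (l.foldl stepA (w, h)).1 * (l.foldl stepA (w, h)).2 =
      (l.foldl (fun a s => max a (bigOf s)) (max w h)) *
      (l.foldl (fun a s => max a (smallOf s)) (min w h)) := by
  induction l generalizing w h with
  | nil =>
      simp only [List.foldl_nil]
      rcases le_total w h with hle | hle <;> simp [hle, Int.mul_comm]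
  | cons x t ih =>
      simp only [List.foldl_cons]
      obtain ⟨h1, h2⟩ := stepA_max_min w h x
      rw [show stepA (w, h) x = ((stepA (w, h) x).1, (stepA (w, h) x).2) from rfl, ih, h1, h2]

-- ===== VERDICT (by name: the statement is the Claim_ definition above) =====
theorem solution_spec : Claim_equal_solution := by
  intro sizes _ hpre
  obtain ⟨hne, -⟩ := hpre
  obtain ⟨x, t, rfl⟩ := List.exists_cons_of_ne_nil hne
  unfold Spec_solution solution solution_alt
  simp only [PySem.List.len_eq]
  rw [PySem.List.foldl_pyRange_pyGetD' (x :: t) ([] : List Int) stepA _ (a := 1) (by norm_num)]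
  rw [recB_char _ (by simp)]
  have hx : PySem.List.pyGetD (x :: t) 0 [] = x := by
    simp [PySem.List.pyGetD, PySem.List.pyGet?, PySem.List.pyIdx?]
  rw [hx]
  simp only [List.map_cons, listMax]
  rw [foldA_char]
  simp only [List.foldl_map]
  rfl
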